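-- pv_equiv track=rewrite | github.com/Rsasa312/othello2025 | __init__.py | find_valid_moves
-- ===== SOURCE A (Python) =====
-- EMPTY = 0
--
-- def find_valid_moves(board, color, opponent):
--     """有効な手を全てリストアップ"""
--     size = len(board)
--     valid_moves = []
--     for row in range(size):
--         for col in range(size):
--             if board[row][col] == EMPTY:
--                 flips = count_flips(board, row, col, color, opponent)
--                 if flips > 0:
--                     valid_moves.append((row, col, flips))
--     return valid_moves
--
-- def count_flips(board, row, col, color, opponent):
--     """指定位置に置いた場合に取れる石の数を数える"""
--     size = len(board)
--     flips = 0
--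
--     directions = [
--         (-1, -1), (-1, 0), (-1, 1),
--         (0, -1),            (0, 1),
--         (1, -1),  (1, 0),  (1, 1)
--     ]
--
--     for dr, dc in directions:
--         temp_flips = 0
--         r, c = row + dr, col + dc
--
--         while 0 <= r < size and 0 <= c < size:
--             if board[r][c] == EMPTY:
--                 break
--             elif board[r][c] == opponent:
--                 temp_flips += 1
--             else:
--                 flips += temp_flips
--                 break
--             r += dr
--             c += dc
--
--     return flips
-- ===== SOURCE B (Python) =====
-- EMPTY = 0
--
-- def find_valid_moves(board, color, opponent):
--     """List valid moves with flip counts.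
--
--     Alternative decomposition: for each direction the in-bounds ray length is
--     computed in closed form, the ray is extracted as a list, and a single
--     early-return pass classifies it (no coordinate-stepping while loop)."""
--     size = len(board)
--     DIRS = [(-1, -1), (-1, 0), (-1, 1), (0, -1), (0, 1), (1, -1), (1, 0), (1, 1)]
--
--     def span(pos, d):
--         # maximum number of steps from pos staying inside [0, size) moving by d
--         if d < 0:
--             return pos
--         if d > 0:
--             return size - 1 - pos
--         return size - 1
--
--     def line_flips(ray):
--         for i, v in enumerate(ray):
--             if v == EMPTY:
--                 return 0
--             if v != opponent:
--                 return i
--         return 0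
--
--     moves = []
--     for r in range(size):
--         for c in range(size):
--             if board[r][c] != EMPTY:
--                 continue
--             total = 0
--             for dr, dc in DIRS:
--                 n = min(span(r, dr), span(c, dc))
--                 total += line_flips([board[r + k * dr][c + k * dc] for k in range(1, n + 1)])
--             if total > 0:
--                 moves.append((r, c, total))
--     return moves
-- ===== Notes on version B (the rewrite author's own statement) =====
-- stated objective: alternative
-- what changed: Per-direction stateful coordinate-stepping while loops (temp_flips accumulator, break) are replaced by computing each in-bounds ray extent in closed form, extracting the ray as a list comprehension, and classifying it with one early-return enumerate pass.
import Mathlib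
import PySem

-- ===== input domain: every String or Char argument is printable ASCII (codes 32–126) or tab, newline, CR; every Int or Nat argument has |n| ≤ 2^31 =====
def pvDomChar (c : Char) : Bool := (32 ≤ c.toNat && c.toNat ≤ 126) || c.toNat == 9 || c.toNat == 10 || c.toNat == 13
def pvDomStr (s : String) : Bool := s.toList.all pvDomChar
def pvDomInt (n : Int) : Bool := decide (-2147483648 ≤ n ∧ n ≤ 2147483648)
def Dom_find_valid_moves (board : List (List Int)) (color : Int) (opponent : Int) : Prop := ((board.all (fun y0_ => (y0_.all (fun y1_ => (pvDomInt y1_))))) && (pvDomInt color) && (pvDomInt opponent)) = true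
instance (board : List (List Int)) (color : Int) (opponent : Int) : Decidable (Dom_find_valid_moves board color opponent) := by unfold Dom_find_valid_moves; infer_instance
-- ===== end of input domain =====

-- B replaces A's per-direction coordinate-stepping while loops by closed-form ray extents,
-- ray extraction and a single early-return classification pass (objective: alternative).

-- board[r][c]; under Pre_ the indices are always in range, so the defaults are never the result
def pvCell (b : List (List Int)) (r c : Int) : Int :=
  (PySem.List.pyGet? (PySem.List.pyGet? b r |>.getD []) c).getD 0

-- ===== PORT A =====
def pvDirsA : List (Int × Int) := [(-1,-1),(-1,0),(-1,1),(0,-1),(0,1),(1,-1),(1,0),(1,1)]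

-- the 'while 0 <= r < size and 0 <= c < size' walk of count_flips; fuel = size+1 bounds the
-- iteration count (each non-break iteration moves the coordinate by (dr,dc) ≠ (0,0))
def pvWalkA (b : List (List Int)) (size dr dc opp flips temp r c : Int) : Nat → Int
  | 0 => flips
  | fuel + 1 =>
    if 0 ≤ r ∧ r < size ∧ 0 ≤ c ∧ c < size then
      if pvCell b r c = 0 then flips
      else if pvCell b r c = opp then
        pvWalkA b size dr dc opp flips (temp + 1) (r + dr) (c + dc) fuel
      else flips + temp
    else flips

def pvCountFlips (b : List (List Int)) (row col color opp : Int) : Int :=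
  let size : Int := b.length
  pvDirsA.foldl
    (fun flips d =>
      pvWalkA b size d.1 d.2 opp flips 0 (row + d.1) (col + d.2) (size.toNat + 1)) 0

def find_valid_moves (board : List (List Int)) (color : Int) (opponent : Int) : List (Int × Int × Int) :=
  let size : Int := board.length
  (PySem.List.pyRange 0 size 1).foldl
    (fun acc row =>
      (PySem.List.pyRange 0 size 1).foldl
        (fun acc col =>
          if pvCell board row col = 0 then
            let flips := pvCountFlips board row col color opponent
            if flips > 0 then acc ++ [(row, col, flips)] else acc
          else acc) acc) []

-- ===== PORT B =====
def pvDirsB : List (Int × Int) := [(-1,-1),(-1,0),(-1,1),(0,-1),(0,1),(1,-1),(1,0),(1,1)]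

-- closed-form maximum number of steps from pos staying inside [0, size) moving by d
def pvSpan (size pos d : Int) : Int :=
  if d < 0 then pos else if 0 < d then size - 1 - pos else size - 1

-- 'for i, v in enumerate(ray): …' with early returns; i is the enumerate counter
def pvLineFlips (opp : Int) : List Int → Int → Int
  | [], _ => 0
  | v :: rest, i => if v = 0 then 0 else if v ≠ opp then i else pvLineFlips opp rest (i + 1)

-- '[board[r + k*dr][c + k*dc] for k in range(1, n + 1)]'
def pvRayB (b : List (List Int)) (size r c dr dc : Int) : List Int :=
  let n := min (pvSpan size r dr) (pvSpan size c dc)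
  (PySem.List.pyRange 1 (n + 1) 1).map (fun k => pvCell b (r + k * dr) (c + k * dc))

def find_valid_moves_alt (board : List (List Int)) (color : Int) (opponent : Int) : List (Int × Int × Int) :=
  let size : Int := board.length
  (PySem.List.pyRange 0 size 1).foldl
    (fun acc r =>
      (PySem.List.pyRange 0 size 1).foldl
        (fun acc c =>
          if pvCell board r c ≠ 0 then acc
          else
            let total := pvDirsB.foldl
              (fun t d => t + pvLineFlips opponent (pvRayB board size r c d.1 d.2) 0) 0
            if total > 0 then acc ++ [(r, c, total)] else acc) acc) []

-- ===== PRECONDITION & SPEC =====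
-- Python A reads board[row][col] for every row, col < len(board); it raises IndexError
-- exactly when some row is shorter than the board. Pre_ excludes exactly those inputs.
def Pre_find_valid_moves (board : List (List Int)) (color : Int) (opponent : Int) : Prop :=
  ∀ row ∈ board, board.length ≤ row.length
instance (board : List (List Int)) (color : Int) (opponent : Int) : Decidable (Pre_find_valid_moves board color opponent) := by unfold Pre_find_valid_moves; infer_instance

def pvWitness_find_valid_moves : List (List Int) × Int × Int := ([[0, 1], [2, 1]], 2, 1)

def Spec_find_valid_moves (board : List (List Int)) (color : Int) (opponent : Int) (out : List (Int × Int × Int)) : Prop := out = find_valid_moves_alt board color opponent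
instance (board : List (List Int)) (color : Int) (opponent : Int) (out : List (Int × Int × Int)) : Decidable (Spec_find_valid_moves board color opponent out) := by unfold Spec_find_valid_moves; infer_instance

-- ===== CLAIM (what is proved, stated in full; the proofs are below) =====
def Claim_equal_find_valid_moves : Prop := ∀ (board : List (List Int)) (color : Int) (opponent : Int), Dom_find_valid_moves board color opponent → Pre_find_valid_moves board color opponent → Spec_find_valid_moves board color opponent (find_valid_moves board color opponent)

-- ===== LEMMAS AND PROOFS =====

-- the cells A's walk visits from (r, c), as a list (proof-side device)
def pvRayFrom (b : List (List Int)) (size dr dc : Int) (r c : Int) : Nat → List Int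
  | 0 => []
  | fuel + 1 =>
    if 0 ≤ r ∧ r < size ∧ 0 ≤ c ∧ c < size then
      pvCell b r c :: pvRayFrom b size dr dc (r + dr) (c + dc) fuel
    else []

-- A's walk computes flips + (classification of the visited ray, starting the counter at temp)
theorem pvWalkA_eq_lineFlips (b : List (List Int)) (size dr dc opp : Int) :
    ∀ (fuel : Nat) (flips temp r c : Int),
      pvWalkA b size dr dc opp flips temp r c fuel =
        flips + pvLineFlips opp (pvRayFrom b size dr dc r c fuel) temp := by
  intro fuel
  induction fuel with
  | zero => intro flips temp r c; simp [pvWalkA, pvRayFrom, pvLineFlips]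
  | succ n ih =>
    intro flips temp r c
    by_cases h : 0 ≤ r ∧ r < size ∧ 0 ≤ c ∧ c < size
    · by_cases h0 : pvCell b r c = 0
      · simp [pvWalkA, pvRayFrom, pvLineFlips, h, h0]
      · by_cases ho : pvCell b r c = opp
        · simp only [pvWalkA, pvRayFrom, pvLineFlips, if_pos h, ne_eq]
          rw [if_neg h0, if_pos ho, if_neg h0, if_neg (show ¬¬pvCell b r c = opp by simp [ho]), ih]
        · simp [pvWalkA, pvRayFrom, pvLineFlips, h, h0, ho]
    · simp [pvWalkA, pvRayFrom, pvLineFlips, h]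

-- step k stays in bounds iff k ≤ min of the closed-form spans (direction ≠ (0,0))
theorem pvInBounds_iff_le_span (size r c dr dc : Int)
    (hdr : dr = -1 ∨ dr = 0 ∨ dr = 1) (hdc : dc = -1 ∨ dc = 0 ∨ dc = 1)
    (hne : ¬(dr = 0 ∧ dc = 0)) (hr : 0 ≤ r ∧ r < size) (hc : 0 ≤ c ∧ c < size)
    (k : Int) (hk : 0 ≤ k) :
    (0 ≤ r + k * dr ∧ r + k * dr < size ∧ 0 ≤ c + k * dc ∧ c + k * dc < size) ↔
      k ≤ min (pvSpan size r dr) (pvSpan size c dc) := by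
  rcases hdr with h1 | h1 | h1 <;> rcases hdc with h2 | h2 | h2 <;>
    simp_all [pvSpan] <;> omega

-- B's comprehension ray equals the ray A's walk visits from the first step
theorem pvRayB_eq_rayFrom (b : List (List Int)) (size r c dr dc : Int)
    (hdr : dr = -1 ∨ dr = 0 ∨ dr = 1) (hdc : dc = -1 ∨ dc = 0 ∨ dc = 1)
    (hne : ¬(dr = 0 ∧ dc = 0)) (hr : 0 ≤ r ∧ r < size) (hc : 0 ≤ c ∧ c < size) :
    pvRayB b size r c dr dc = pvRayFrom b size dr dc (r + dr) (c + dc) (size.toNat + 1) := by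
  have hspan : 0 ≤ min (pvSpan size r dr) (pvSpan size c dc) ∧
      min (pvSpan size r dr) (pvSpan size c dc) ≤ size - 1 := by
    rcases hdr with h1 | h1 | h1 <;> rcases hdc with h2 | h2 | h2 <;>
      simp_all [pvSpan] <;> omega
  set n := min (pvSpan size r dr) (pvSpan size c dc) with hn
  have key : ∀ (m : Nat) (j : Int) (fuel : Nat), 1 ≤ j → j ≤ n + 1 →
      (n + 1 - j).toNat = m → (n + 1 - j).toNat < fuel →
      (PySem.List.pyRange j (n + 1) 1).map (fun k => pvCell b (r + k * dr) (c + k * dc)) =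
        pvRayFrom b size dr dc (r + j * dr) (c + j * dc) fuel := by
    intro m
    induction m with
    | zero =>
      intro j fuel h1 h2 hm hf
      have hj : j = n + 1 := by omega
      have hout : ¬(0 ≤ r + j * dr ∧ r + j * dr < size ∧ 0 ≤ c + j * dc ∧ c + j * dc < size) := by
        rw [pvInBounds_iff_le_span size r c dr dc hdr hdc hne hr hc j (by omega)]
        omega
      rw [PySem.List.pyRange_one_eq_nil (by omega)]
      cases fuel with
      | zero => simp [pvRayFrom]
      | succ f => simp [pvRayFrom, hout]
    | succ m ih =>
      intro j fuel h1 h2 hm hf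
      have hj : j ≤ n := by omega
      have hin : 0 ≤ r + j * dr ∧ r + j * dr < size ∧ 0 ≤ c + j * dc ∧ c + j * dc < size := by
        rw [pvInBounds_iff_le_span size r c dr dc hdr hdc hne hr hc j (by omega)]
        omega
      obtain ⟨f, rfl⟩ : ∃ f, fuel = f + 1 := ⟨fuel - 1, by omega⟩
      rw [PySem.List.pyRange_one_cons (by omega), List.map_cons]
      simp only [pvRayFrom, hin, and_self, if_true]
      congr 1
      have := ih (j + 1) f (by omega) (by omega) (by omega) (by omega)
      rw [show r + (j + 1) * dr = r + j * dr + dr by ring,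
          show c + (j + 1) * dc = c + j * dc + dc by ring] at this
      exact this
  have := key (n + 1 - 1).toNat 1 (size.toNat + 1) (by omega) (by omega) rfl (by omega)
  simpa [pvRayB, ← hn, one_mul] using this

-- per cell: A's count_flips equals B's per-direction total
theorem pvCountFlips_eq (b : List (List Int)) (r c color opp : Int)
    (hr : 0 ≤ r ∧ r < (b.length : Int)) (hc : 0 ≤ c ∧ c < (b.length : Int)) :
    pvCountFlips b r c color opp =
      pvDirsB.foldl (fun t d => t + pvLineFlips opp (pvRayB b b.length r c d.1 d.2) 0) 0 := by
  unfold pvCountFlips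
  have hAB : pvDirsA = pvDirsB := rfl
  rw [hAB]
  apply PySem.List.foldl_congr_mem
  intro acc d hd
  have hdir : (d.1 = -1 ∨ d.1 = 0 ∨ d.1 = 1) ∧ (d.2 = -1 ∨ d.2 = 0 ∨ d.2 = 1) ∧
      ¬(d.1 = 0 ∧ d.2 = 0) := by
    fin_cases hd <;> simp
  rw [pvWalkA_eq_lineFlips,
    ← pvRayB_eq_rayFrom b b.length r c d.1 d.2 hdir.1 hdir.2.1 hdir.2.2 hr hc]

-- ===== VERDICT (by name: the statement is the Claim_ definition above) =====
theorem find_valid_moves_spec : Claim_equal_find_valid_moves := by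
  intro board color opponent _ _
  unfold Spec_find_valid_moves find_valid_moves find_valid_moves_alt
  apply PySem.List.foldl_congr_mem
  intro acc r hrmem
  have hr : 0 ≤ r ∧ r < (board.length : Int) := by
    simpa using (PySem.List.mem_pyRange_one.mp hrmem)
  apply PySem.List.foldl_congr_mem
  intro acc c hcmem
  have hc : 0 ≤ c ∧ c < (board.length : Int) := by
    simpa using (PySem.List.mem_pyRange_one.mp hcmem)
  by_cases h0 : pvCell board r c = 0
  · simp only [h0, if_true, ne_eq, not_true_eq_false, if_false]
    rw [pvCountFlips_eq board r c color opponent hr hc]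
  · simp [h0]
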